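-- pv_equiv track=rewrite | github.com/seiichisan/HapoItak | util/string_util.py | add_comma_at_the_end_every_word
-- ===== SOURCE A (Python) =====
-- def add_word_to_end(text, word):
-- 	save = text + word
-- 	return save
--
-- def add_comma_at_the_end_every_word(text):
-- 	text_array = text.split("\n")
-- 	text_array_length = len(text_array)
--
-- 	if len(text_array[text_array_length-1]) == 0:
-- 		is_semi_last = True
-- 	else:
-- 		is_semi_last = False
--
-- 	i = 0
-- 	save = ""
-- 	for text_line in text_array:
-- 		if i == text_array_length-2 and is_semi_last:
-- 			save = save + add_comma_at_the_end_every_word_main(text_line, True)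
-- 		elif i == text_array_length-1:
-- 			save = save + add_comma_at_the_end_every_word_main(text_line, True)
-- 		else:
-- 			save = save + add_comma_at_the_end_every_word_main(text_line, False)
-- 		if not(i == text_array_length-1):
-- 			save = save + "\n"
-- 		i = i + 1
--
-- 	return save
--
-- def add_comma_at_the_end_every_word_main(text, is_last_line):
-- 	text_array = text.split(" ")
-- 	text_array_length = len(text_array)
--
-- 	i = 0
-- 	save = ""
-- 	for text_line in text_array:
-- 		if len(text_line) == 0:
-- 			pass
-- 		elif not(is_last_line):
-- 			save = save + add_word_to_end(text_line, ",")
-- 		elif i == text_array_length-1: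
-- 			save = save + text_line
-- 		else:
-- 			save = save + add_word_to_end(text_line, ",")
--
-- 		if not(i == text_array_length-1):
-- 			save = save + " "
--
-- 		i = i + 1
--
-- 	return save
-- ===== SOURCE B (Python) =====
-- def add_comma_at_the_end_every_word(text):
-- 	# One char-level pass: append a comma after every maximal run of
-- 	# non-space/non-newline characters, then remove the single comma that
-- 	# was placed after the final word of the last content line (only when
-- 	# that line ends in a word character).
-- 	out = []
-- 	prev_word = False
-- 	for c in text:
-- 		if prev_word and (c == ' ' or c == '\n'):
-- 			out.append(',')
-- 		out.append(c)
-- 		prev_word = not (c == ' ' or c == '\n')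
-- 	if prev_word:
-- 		out.append(',')
-- 	result = ''.join(out)
--
-- 	lines = result.split('\n')
-- 	idx = len(lines) - 1
-- 	if idx > 0 and lines[idx] == '':
-- 		idx = idx - 1
-- 	if lines[idx].endswith(','):
-- 		lines[idx] = lines[idx][:-1]
-- 	return '\n'.join(lines)
-- ===== Notes on version B (the rewrite author's own statement) =====
-- stated objective: alternative
-- what changed: Replaced the nested split-by-line/split-by-space index-flag loops with a single character-level pass that appends a comma after every maximal non-space/non-newline run, followed by one targeted fixup removing the comma after the final word of the last content line.
import Mathlib
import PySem

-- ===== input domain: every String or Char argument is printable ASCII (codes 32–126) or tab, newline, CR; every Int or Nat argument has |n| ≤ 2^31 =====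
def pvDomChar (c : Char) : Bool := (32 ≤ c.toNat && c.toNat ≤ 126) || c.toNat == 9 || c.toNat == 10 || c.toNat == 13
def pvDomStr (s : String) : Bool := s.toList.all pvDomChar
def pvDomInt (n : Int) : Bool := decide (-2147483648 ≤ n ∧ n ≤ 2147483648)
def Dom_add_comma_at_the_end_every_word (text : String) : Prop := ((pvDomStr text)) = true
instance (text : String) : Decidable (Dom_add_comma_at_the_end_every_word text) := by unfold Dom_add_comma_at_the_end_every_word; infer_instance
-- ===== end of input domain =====

-- B replaces A's nested split-by-line/split-by-space index-flag loops with one char-level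
-- pass (comma after every maximal word run) plus a single targeted fixup on the last
-- content line; objective: alternative (a different algorithm, no speed claim).

-- ===== PORT A =====
def add_word_to_end (text word : List Char) : List Char := text ++ word

def add_comma_at_the_end_every_word_main (text : List Char) (is_last_line : Bool) : List Char :=
  let text_array := PySem.Chars.splitOn text [' ']
  let text_array_length : Int := text_array.length
  (text_array.foldl (fun (st : Int × List Char) text_line =>
      let i := st.1
      let save := st.2
      let save :=
        if text_line.length = 0 then save
        else if is_last_line = false then save ++ add_word_to_end text_line [',']
        else if i = text_array_length - 1 then save ++ text_line
        else save ++ add_word_to_end text_line [',']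
      let save := if ¬ (i = text_array_length - 1) then save ++ [' '] else save
      (i + 1, save)) (0, [])).2

def add_comma_at_the_end_every_word (text : String) : String :=
  let text_array := PySem.Chars.splitOn text.toList ['\n']
  let text_array_length : Int := text_array.length
  -- text_array[len-1]: always in range (split never returns []), so `.getD []` is exact
  let is_semi_last : Bool :=
    ((PySem.List.pyGet? text_array (text_array_length - 1)).getD []).length = 0
  String.ofList ((text_array.foldl (fun (st : Int × List Char) text_line =>
      let i := st.1
      let save := st.2
      let save :=
        if i = text_array_length - 2 ∧ is_semi_last = true then
          save ++ add_comma_at_the_end_every_word_main text_line true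
        else if i = text_array_length - 1 then
          save ++ add_comma_at_the_end_every_word_main text_line true
        else save ++ add_comma_at_the_end_every_word_main text_line false
      let save := if ¬ (i = text_array_length - 1) then save ++ ['\n'] else save
      (i + 1, save)) (0, [])).2)

-- ===== PORT B =====
def add_comma_at_the_end_every_word_alt (text : String) : String :=
  -- one pass with a "previous char was a word char" flag
  let p := text.toList.foldl (fun (st : List Char × Bool) c =>
      let out := if st.2 && (c == ' ' || c == '\n') then st.1 ++ [','] else st.1
      (out ++ [c], !(c == ' ' || c == '\n'))) ([], false)
  let result := if p.2 then p.1 ++ [','] else p.1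
  -- fixup: drop the comma after the final word of the last content line
  let lines := PySem.Chars.splitOn result ['\n']
  let idx : Int := lines.length - 1
  let idx := if idx > 0 ∧ (PySem.List.pyGet? lines idx).getD [] = [] then idx - 1 else idx
  let line := (PySem.List.pyGet? lines idx).getD []
  let lines :=
    if PySem.Chars.endswith line [','] then
      lines.set idx.toNat (PySem.Chars.slice line none (some (-1)))
    else lines
  String.ofList (PySem.Chars.join ['\n'] lines)

-- ===== PRECONDITION & SPEC =====
def Spec_add_comma_at_the_end_every_word (text : String) (out : String) : Prop := out = add_comma_at_the_end_every_word_alt text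
instance (text : String) (out : String) : Decidable (Spec_add_comma_at_the_end_every_word text out) := by unfold Spec_add_comma_at_the_end_every_word; infer_instance

-- ===== CLAIM (what is proved, stated in full; the proofs are below) =====
def Claim_equal_add_comma_at_the_end_every_word : Prop := ∀ (text : String), Dom_add_comma_at_the_end_every_word text → Spec_add_comma_at_the_end_every_word text (add_comma_at_the_end_every_word text)

-- ===== LEMMAS AND PROOFS =====

-- separator predicate shared by both programs
def pvSep (c : Char) : Bool := c == ' ' || c == '\n'

-- head-map on a list of lines
def pvMapHead (f : List Char → List Char) : List (List Char) → List (List Char)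
  | [] => []
  | x :: xs => f x :: xs

-- clean recursion for split on a single-character separator
def pvSplit (c : Char) : List Char → List (List Char)
  | [] => [[]]
  | d :: rest => if d = c then [] :: pvSplit c rest else pvMapHead (d :: ·) (pvSplit c rest)

-- clean recursion for B's comma pass
def pvBody (pw : Bool) : List Char → List Char
  | [] => []
  | c :: rest => (if pw && pvSep c then [','] else []) ++ c :: pvBody (!pvSep c) rest

def pvFinal (pw : Bool) : List Char → Bool
  | [] => pw
  | _c :: rest => pvFinal (!pvSep _c) rest

def pvAdd (l : List Char) : List Char := pvBody false l ++ (if pvFinal false l then [','] else [])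

def pvFix (r : List Char) : List Char :=
  if PySem.Chars.endswith r [','] then PySem.Chars.slice r none (some (-1)) else r

def pvJoin (c : Char) : List (List Char) → List Char
  | [] => []
  | l :: ls => match ls with
    | [] => l
    | _ :: _ => l ++ c :: pvJoin c ls

def pvTokF (t : List Char) : List Char := if t = [] then [] else t ++ [',']

def pvTokJoin (last : Bool) : List (List Char) → List Char
  | [] => []
  | t :: ts => match ts with
    | [] => if last then t else pvTokF t
    | _ :: _ => pvTokF t ++ ' ' :: pvTokJoin last ts

def pvMainF (l : List Char) : List Char := pvTokJoin false (pvSplit ' ' l)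
def pvMainT (l : List Char) : List Char := pvTokJoin true (pvSplit ' ' l)

def pvOut (semi : Bool) : List (List Char) → List Char
  | [] => []
  | l :: ls => match ls with
    | [] => pvMainT l
    | _ :: _ => (if ls.length = 1 ∧ semi = true then pvMainT l else pvMainF l) ++ '\n' :: pvOut semi ls

-- ---- basic facts about the helpers ----

theorem pvJoin_eq_intercalate (c : Char) (ls : List (List Char)) :
    [c].intercalate ls = pvJoin c ls := by
  induction ls with
  | nil => simp [pvJoin, List.intercalate]
  | cons a as ih =>
    cases as with
    | nil => simp [pvJoin, List.intercalate]
    | cons b bs =>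
      show [c].intercalate (a :: b :: bs) = a ++ c :: pvJoin c (b :: bs)
      rw [← ih]
      simp [List.intercalate, List.intersperse]

theorem pvSplit_ne_nil (c : Char) (s : List Char) : pvSplit c s ≠ [] := by
  induction s with
  | nil => simp [pvSplit]
  | cons d rest ih =>
    simp only [pvSplit]
    split
    · simp
    · cases h : pvSplit c rest with
      | nil => exact absurd h ih
      | cons a as => simp [pvMapHead]

theorem pvSplitOn_go_eq (c : Char) (l : List Char) : ∀ (fuel : Nat) (cur : List Char)
    (acc : List (List Char)), l.length < fuel →
    PySem.Chars.splitOn.go [c] fuel l cur acc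
      = acc.reverse ++ pvMapHead (cur.reverse ++ ·) (pvSplit c l) := by
  induction l with
  | nil =>
    intro fuel cur acc h
    match fuel, h with
    | fuel+1, _ =>
      simp [PySem.Chars.splitOn.go, pvSplit, pvMapHead]
  | cons d rest ih =>
    intro fuel cur acc h
    match fuel, h with
    | fuel+1, h =>
      rw [PySem.Chars.splitOn.go]
      by_cases hdc : d = c
      · subst hdc
        have hpre : List.isPrefixOf [d] (d :: rest) = true := by simp [List.isPrefixOf]
        simp only [hpre, if_pos, List.length_cons, List.length_nil, List.drop_succ_cons, List.drop_zero, Nat.zero_add]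
        rw [ih fuel [] (cur.reverse :: acc) (by simpa using Nat.lt_of_succ_lt_succ h)]
        simp [pvSplit, pvMapHead]
        cases hs : pvSplit d rest with
        | nil => exact absurd hs (pvSplit_ne_nil d rest)
        | cons a as => simp [pvMapHead]
      · have hpre : List.isPrefixOf [c] (d :: rest) = false := by
          simp [List.isPrefixOf]; exact fun hh => absurd hh.symm hdc
        simp only [hpre, Bool.false_eq_true, if_neg, not_false_iff]
        rw [ih fuel (d :: cur) acc (by simpa using Nat.lt_of_succ_lt_succ h)]
        simp only [pvSplit, if_neg hdc]
        cases hs : pvSplit c rest with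
        | nil => exact absurd hs (pvSplit_ne_nil c rest)
        | cons a as => simp [pvMapHead]

theorem pvSplitOn_eq (c : Char) (s : List Char) : PySem.Chars.splitOn s [c] = pvSplit c s := by
  rw [PySem.Chars.splitOn, pvSplitOn_go_eq c s (s.length+1) [] [] (by omega)]
  cases hs : pvSplit c s with
  | nil => exact absurd hs (pvSplit_ne_nil c s)
  | cons a as => simp [pvMapHead]

theorem pvJoin_split (c : Char) (s : List Char) : pvJoin c (pvSplit c s) = s := by
  induction s with
  | nil => simp [pvSplit, pvJoin]
  | cons d rest ih =>
    by_cases hdc : d = c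
    · subst hdc
      cases hs : pvSplit d rest with
      | nil => exact absurd hs (pvSplit_ne_nil d rest)
      | cons a as =>
        rw [hs] at ih
        simp only [pvSplit, if_pos rfl, hs]
        show ([] : List Char) ++ d :: pvJoin d (a :: as) = d :: rest
        simp [ih]
    · cases hs : pvSplit c rest with
      | nil => exact absurd hs (pvSplit_ne_nil c rest)
      | cons a as =>
        rw [hs] at ih
        simp only [pvSplit, if_neg hdc, hs, pvMapHead]
        cases as with
        | nil => simpa [pvJoin] using ih
        | cons b bs =>
          show (d :: a) ++ c :: pvJoin c (b :: bs) = d :: rest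
          simp only [pvJoin] at ih
          simpa using ih

theorem pvSplit_not_mem (c : Char) (s : List Char) :
    ∀ l ∈ pvSplit c s, c ∉ l := by
  induction s with
  | nil => simp [pvSplit]
  | cons d rest ih =>
    by_cases hdc : d = c
    · subst hdc
      simp only [pvSplit, if_pos rfl]
      intro l hl
      rcases List.mem_cons.1 hl with h | h
      · simp [h]
      · exact ih l h
    · simp only [pvSplit, if_neg hdc]
      cases hs : pvSplit c rest with
      | nil => exact absurd hs (pvSplit_ne_nil c rest)
      | cons a as =>
        intro l hl
        rcases List.mem_cons.1 (by simpa [pvMapHead] using hl) with h | h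
        · subst h
          intro hm
          rcases List.mem_cons.1 hm with h | h
          · exact hdc h.symm
          · exact ih a (by rw [hs]; exact List.mem_cons_self) h
        · exact ih l (by rw [hs]; exact List.mem_cons_of_mem a h)

theorem pvSplit_mem_mem (c : Char) (s : List Char) :
    ∀ l ∈ pvSplit c s, ∀ x ∈ l, x ∈ s := by
  induction s with
  | nil => simp [pvSplit]
  | cons d rest ih =>
    by_cases hdc : d = c
    · subst hdc
      simp only [pvSplit, if_pos rfl]
      intro l hl x hx
      rcases List.mem_cons.1 hl with h | h
      · subst h; simp at hx
      · exact List.mem_cons_of_mem d (ih l h x hx)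
    · simp only [pvSplit, if_neg hdc]
      cases hs : pvSplit c rest with
      | nil => exact absurd hs (pvSplit_ne_nil c rest)
      | cons a as =>
        intro l hl x hx
        rcases List.mem_cons.1 (by simpa [pvMapHead] using hl) with h | h
        · subst h
          rcases List.mem_cons.1 hx with h | h
          · simp [h]
          · exact List.mem_cons_of_mem d (ih a (by rw [hs]; exact List.mem_cons_self) x h)
        · exact List.mem_cons_of_mem d (ih l (by rw [hs]; exact List.mem_cons_of_mem a h) x hx)

theorem pvSplit_join (c : Char) (ls : List (List Char)) (hne : ls ≠ [])
    (h : ∀ l ∈ ls, c ∉ l) : pvSplit c (pvJoin c ls) = ls := by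
  induction ls with
  | nil => exact absurd rfl hne
  | cons a as ih =>
    cases as with
    | nil =>
      show pvSplit c a = [a]
      have ha : c ∉ a := h a List.mem_cons_self
      clear ih hne h
      induction a with
      | nil => simp [pvSplit]
      | cons x xs ihx =>
        have hxc : ¬ x = c := fun hh => ha (by simp [hh])
        have hxs : pvSplit c xs = [xs] := ihx (fun hm => ha (List.mem_cons_of_mem x hm))
        simp [pvSplit, if_neg hxc, hxs, pvMapHead]
    | cons b bs =>
      have ih' := ih (by simp) (fun l hl => h l (List.mem_cons_of_mem a hl))
      show pvSplit c (a ++ c :: pvJoin c (b :: bs)) = a :: b :: bs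
      have ha : c ∉ a := h a List.mem_cons_self
      clear ih hne h
      induction a with
      | nil =>
        simp [List.nil_append, pvSplit, ih']
      | cons x xs ihx =>
        have hxc : ¬ x = c := fun hh => ha (by simp [hh])
        have hxs := ihx (fun hm => ha (List.mem_cons_of_mem x hm))
        simp only [List.cons_append, pvSplit, if_neg hxc, hxs, pvMapHead]

theorem pvBody_append (pw : Bool) (x y : List Char) :
    pvBody pw (x ++ y) = pvBody pw x ++ pvBody (pvFinal pw x) y := by
  induction x generalizing pw with
  | nil => simp [pvBody, pvFinal]
  | cons c rest ih => simp [pvBody, pvFinal, ih]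

theorem pvFinal_append (pw : Bool) (x y : List Char) :
    pvFinal pw (x ++ y) = pvFinal (pvFinal pw x) y := by
  induction x generalizing pw with
  | nil => simp [pvFinal]
  | cons c rest ih => simp [pvFinal, ih]

theorem pvFoldB (l : List Char) : ∀ (acc : List Char) (pw : Bool),
    l.foldl (fun (st : List Char × Bool) c =>
      let out := if st.2 && (c == ' ' || c == '\n') then st.1 ++ [','] else st.1
      (out ++ [c], !(c == ' ' || c == '\n'))) (acc, pw)
    = (acc ++ pvBody pw l, pvFinal pw l) := by
  induction l with
  | nil => intro acc pw; simp [pvBody, pvFinal]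
  | cons c rest ih =>
    intro acc pw
    simp only [List.foldl_cons, ih, pvBody, pvFinal, pvSep]
    split <;> simp

theorem pvAdd_join (c : Char) (hc : pvSep c = true) (ls : List (List Char)) (hne : ls ≠ []) :
    pvAdd (pvJoin c ls) = pvJoin c (ls.map pvAdd) := by
  induction ls with
  | nil => exact absurd rfl hne
  | cons a as ih =>
    cases as with
    | nil => simp [pvJoin]
    | cons b bs =>
      have ih' := ih (by simp)
      show pvAdd (a ++ c :: pvJoin c (b :: bs)) = pvAdd a ++ c :: pvJoin c ((b :: bs).map pvAdd)
      rw [← ih']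
      simp only [pvAdd, pvBody_append, pvFinal_append]
      simp only [pvBody, pvFinal, hc, Bool.not_true, Bool.and_true]
      cases hf : pvFinal false a <;> simp [List.append_assoc]

theorem pvAdd_word (t : List Char) (h : ∀ x ∈ t, pvSep x = false) :
    pvAdd t = if t = [] then [] else t ++ [','] := by
  have key : ∀ (pw : Bool) (t : List Char), (∀ x ∈ t, pvSep x = false) →
      pvBody pw t = t ∧ pvFinal pw t = (if t = [] then pw else true) := by
    intro pw t ht
    induction t generalizing pw with
    | nil => simp [pvBody, pvFinal]
    | cons c rest ih =>
      have hc : pvSep c = false := ht c List.mem_cons_self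
      have := ih (!pvSep c) (fun x hx => ht x (List.mem_cons_of_mem c hx))
      cases rest <;> simp_all [pvBody, pvFinal, hc]
  rcases key false t h with ⟨h1, h2⟩
  cases t with
  | nil => simp [pvAdd, pvBody, pvFinal]
  | cons c rest => simp [pvAdd, h1, h2]

theorem pvAdd_eq_nil_iff (l : List Char) : pvAdd l = [] ↔ l = [] := by
  constructor
  · intro h
    cases l with
    | nil => rfl
    | cons c rest =>
      exfalso
      simp only [pvAdd, pvBody] at h
      rcases List.append_eq_nil_iff.1 h with ⟨h1, -⟩
      rcases List.append_eq_nil_iff.1 h1 with ⟨-, h2⟩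
      exact List.cons_ne_nil _ _ h2
  · intro h; subst h; decide

theorem pvAdd_nil : pvAdd [] = [] := by decide

theorem pvBody_mem (pw : Bool) (l : List Char) :
    ∀ x ∈ pvBody pw l, x ∈ l ∨ x = ',' := by
  induction l generalizing pw with
  | nil => simp [pvBody]
  | cons c rest ih =>
    intro x hx
    simp only [pvBody, List.mem_append] at hx
    rcases hx with hx | hx
    · right; revert hx; split <;> simp_all
    · rcases List.mem_cons.1 hx with hx | hx
      · left; simp [hx]
      · rcases ih (!pvSep c) x hx with h | h
        · left; exact List.mem_cons_of_mem c h
        · right; exact h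

theorem pvAdd_not_mem (l : List Char) (h : ('\n' : Char) ∉ l) : ('\n' : Char) ∉ pvAdd l := by
  intro hm
  simp only [pvAdd, List.mem_append] at hm
  rcases hm with hm | hm
  · rcases pvBody_mem false l '\n' hm with hh | hh
    · exact h hh
    · exact absurd hh (by decide)
  · revert hm; split <;> simp

theorem pvSlice_dropLast (r : List Char) : PySem.Chars.slice r none (some (-1)) = r.dropLast := by
  cases r with
  | nil => decide
  | cons a as =>
    simp [PySem.Chars.slice_eq_listSlice, PySem.List.slice, PySem.List.clampIdx,
      List.dropLast_eq_take]
    have : ¬ ((as.length : Int) < 0) := by omega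
    simp [this]

theorem pvFix_comma (x : List Char) : pvFix (x ++ [',']) = x := by
  have he : PySem.Chars.endswith (x ++ [',']) [','] = true := by
    rw [PySem.Chars.endswith_iff]; exact ⟨x, rfl⟩
  rw [pvFix, if_pos he, pvSlice_dropLast]
  simp

theorem pvFix_nocomma (r : List Char) (h : r.getLast? ≠ some ',') : pvFix r = r := by
  have he : PySem.Chars.endswith r [','] = false := by
    rw [Bool.eq_false_iff]
    intro hh
    rcases (PySem.Chars.endswith_iff r [',']).1 hh with ⟨t, ht⟩
    exact h (by rw [← ht]; simp)
  simp [pvFix, he]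

theorem pvFix_append (x y : List Char) (h : y ≠ []) : pvFix (x ++ y) = x ++ pvFix y := by
  by_cases hc : y.getLast? = some ','
  · obtain ⟨z, hz⟩ : ∃ z, y = z ++ [','] := by
      cases hy : y.getLast? with
      | none => simp_all
      | some a =>
        have := List.getLast?_eq_some_iff.1 hy
        rcases this with ⟨z, hz⟩
        exact ⟨z, by simpa [hy] using by rw [hz]; simp_all⟩
    subst hz
    rw [← List.append_assoc, pvFix_comma, pvFix_comma]
  · rw [pvFix_nocomma y hc, pvFix_nocomma (x ++ y) (by rw [List.getLast?_append, Option.or_of_isSome (List.getLast?_isSome.2 h)]; exact hc)]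

-- ---- A-side loops (to be filled) ----

theorem pvFoldMain (last : Bool) (n : Int) (toks : List (List Char)) :
    ∀ (i : Int) (save : List Char), i + toks.length = n → toks ≠ [] →
    (toks.foldl (fun (st : Int × List Char) text_line =>
      let i := st.1
      let save := st.2
      let save :=
        if text_line.length = 0 then save
        else if last = false then save ++ add_word_to_end text_line [',']
        else if i = n - 1 then save ++ text_line
        else save ++ add_word_to_end text_line [',']
      let save := if ¬ (i = n - 1) then save ++ [' '] else save
      (i + 1, save)) (i, save)).2 = save ++ pvTokJoin last toks := by
  induction toks with
  | nil => intro i save h hne; exact absurd rfl hne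
  | cons t ts ih =>
    intro i save h _
    cases ts with
    | nil =>
      have hi : i = n - 1 := by simp at h; omega
      simp only [List.foldl_cons, List.foldl_nil]
      by_cases ht : t.length = 0
      · have ht' : t = [] := List.length_eq_zero_iff.1 ht
        subst ht'
        cases last <;> simp [hi, pvTokJoin, pvTokF]
      · have ht' : ¬ t = [] := fun hh => ht (by simp [hh])
        cases last <;>
          simp [ht, hi, pvTokJoin, pvTokF, ht', add_word_to_end]
    | cons b bs =>
      have hi : ¬ (i = n - 1) := by simp at h; omega
      have hstep : (fun (st : Int × List Char) text_line =>
          let i := st.1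
          let save := st.2
          let save :=
            if text_line.length = 0 then save
            else if last = false then save ++ add_word_to_end text_line [',']
            else if i = n - 1 then save ++ text_line
            else save ++ add_word_to_end text_line [',']
          let save := if ¬ (i = n - 1) then save ++ [' '] else save
          (i + 1, save)) (i, save) t = (i + 1, (save ++ pvTokF t) ++ [' ']) := by
        by_cases ht : t.length = 0
        · have ht' : t = [] := List.length_eq_zero_iff.1 ht
          subst ht'
          cases last <;> simp [hi, pvTokF]
        · have ht' : ¬ t = [] := fun hh => ht (by simp [hh])
          cases last <;> simp [ht, hi, pvTokF, ht', add_word_to_end]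
      rw [List.foldl_cons]
      simp only [hstep]
      rw [ih (i + 1) ((save ++ pvTokF t) ++ [' '])
        (by simp only [List.length_cons] at h ⊢; push_cast at h ⊢; omega) (by simp)]
      simp [pvTokJoin]

theorem pvMain_eq (l : List Char) (last : Bool) :
    add_comma_at_the_end_every_word_main l last = pvTokJoin last (pvSplit ' ' l) := by
  unfold add_comma_at_the_end_every_word_main
  rw [pvSplitOn_eq]
  have h := pvFoldMain last ((pvSplit ' ' l).length : Int) (pvSplit ' ' l) 0 []
    (by simp) (pvSplit_ne_nil ' ' l)
  simpa using h

theorem pvTokJoinF_eq (toks : List (List Char)) :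
    pvTokJoin false toks = pvJoin ' ' (toks.map pvTokF) := by
  induction toks with
  | nil => rfl
  | cons t ts ih =>
    cases ts with
    | nil => simp [pvTokJoin, pvJoin]
    | cons b bs =>
      show pvTokF t ++ ' ' :: pvTokJoin false (b :: bs)
        = pvTokF t ++ ' ' :: pvJoin ' ' ((b :: bs).map pvTokF)
      rw [ih]

theorem pvTokJoinT_eq (toks : List (List Char)) (hne : toks ≠ []) :
    pvTokJoin true toks = pvFix (pvJoin ' ' (toks.map pvTokF)) := by
  induction toks with
  | nil => exact absurd rfl hne
  | cons t ts ih =>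
    cases ts with
    | nil =>
      show (if true = true then t else pvTokF t) = pvFix (pvTokF t)
      by_cases ht : t = []
      · subst ht; simp [pvTokF, pvFix, PySem.Chars.endswith]
      · rw [show pvTokF t = t ++ [','] by simp [pvTokF, ht], pvFix_comma]
        simp
    | cons b bs =>
      have ih' := ih (by simp)
      show pvTokF t ++ ' ' :: pvTokJoin true (b :: bs)
        = pvFix (pvTokF t ++ ' ' :: pvJoin ' ' ((b :: bs).map pvTokF))
      rw [show pvTokF t ++ ' ' :: pvJoin ' ' ((b :: bs).map pvTokF)
          = (pvTokF t ++ [' ']) ++ pvJoin ' ' ((b :: bs).map pvTokF) by simp]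
      by_cases hj : pvJoin ' ' ((b :: bs).map pvTokF) = []
      · rw [hj, List.append_nil, pvFix_nocomma _ (by simp)]
        rw [ih', hj]
        simp [pvFix, PySem.Chars.endswith]
      · rw [pvFix_append _ _ hj, ih']
        simp

theorem pvTokens_word (l : List Char) (h : ('\n' : Char) ∉ l) :
    ∀ t ∈ pvSplit ' ' l, ∀ x ∈ t, pvSep x = false := by
  intro t ht x hx
  have hsp : x ≠ ' ' := fun hh => (pvSplit_not_mem ' ' l t ht) (hh ▸ hx)
  have hnl : x ≠ '\n' := fun hh => h (hh ▸ pvSplit_mem_mem ' ' l t ht x hx)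
  simp [pvSep, hsp, hnl]

theorem pvMap_add_tokF (l : List Char) (h : ('\n' : Char) ∉ l) :
    (pvSplit ' ' l).map pvAdd = (pvSplit ' ' l).map pvTokF :=
  List.map_congr_left (fun t ht => by rw [pvAdd_word t (pvTokens_word l h t ht)]; rfl)

theorem pvAdd_line (l : List Char) (h : ('\n' : Char) ∉ l) :
    pvAdd l = pvJoin ' ' ((pvSplit ' ' l).map pvTokF) := by
  rw [← pvMap_add_tokF l h, ← pvAdd_join ' ' (by decide) _ (pvSplit_ne_nil ' ' l),
    pvJoin_split]

theorem pvMainF_eq_add (l : List Char) (h : ('\n' : Char) ∉ l) : pvMainF l = pvAdd l := by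
  rw [pvMainF, pvTokJoinF_eq, pvAdd_line l h]

theorem pvMainT_eq_fix (l : List Char) (h : ('\n' : Char) ∉ l) : pvMainT l = pvFix (pvAdd l) := by
  rw [pvMainT, pvTokJoinT_eq _ (pvSplit_ne_nil ' ' l), pvAdd_line l h]

theorem pvFoldOut (semi : Bool) (n : Int) (ls : List (List Char)) :
    ∀ (i : Int) (save : List Char), i + ls.length = n → ls ≠ [] →
    (ls.foldl (fun (st : Int × List Char) text_line =>
      let i := st.1
      let save := st.2
      let save :=
        if i = n - 2 ∧ semi = true then
          save ++ add_comma_at_the_end_every_word_main text_line true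
        else if i = n - 1 then
          save ++ add_comma_at_the_end_every_word_main text_line true
        else save ++ add_comma_at_the_end_every_word_main text_line false
      let save := if ¬ (i = n - 1) then save ++ ['\n'] else save
      (i + 1, save)) (i, save)).2 = save ++ pvOut semi ls := by
  induction ls with
  | nil => intro i save h hne; exact absurd rfl hne
  | cons t ts ih =>
    intro i save h _
    cases ts with
    | nil =>
      have hi : i = n - 1 := by simp at h; omega
      have hi2 : ¬ (i = n - 2 ∧ semi = true) := by
        rintro ⟨h2, -⟩; omega
      simp only [List.foldl_cons, List.foldl_nil]
      simp [hi2, hi, pvOut, pvMain_eq, pvMainT]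
    | cons b bs =>
      have hlen : i + (2 + bs.length) = n := by
        simp only [List.length_cons] at h; push_cast at h ⊢; omega
      have hi : ¬ (i = n - 1) := by omega
      have hcond : (i = n - 2 ∧ semi = true) ↔ ((b :: bs).length = 1 ∧ semi = true) := by
        constructor
        · rintro ⟨h1, h2⟩
          refine ⟨?_, h2⟩
          simp only [List.length_cons]
          omega
        · rintro ⟨h1, h2⟩
          refine ⟨?_, h2⟩
          simp only [List.length_cons] at h1
          omega
      have hstep : (fun (st : Int × List Char) text_line =>
          let i := st.1
          let save := st.2
          let save :=
            if i = n - 2 ∧ semi = true then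
              save ++ add_comma_at_the_end_every_word_main text_line true
            else if i = n - 1 then
              save ++ add_comma_at_the_end_every_word_main text_line true
            else save ++ add_comma_at_the_end_every_word_main text_line false
          let save := if ¬ (i = n - 1) then save ++ ['\n'] else save
          (i + 1, save)) (i, save) t
          = (i + 1, (save ++ (if (b :: bs).length = 1 ∧ semi = true then pvMainT t
              else pvMainF t)) ++ ['\n']) := by
        by_cases hc : (b :: bs).length = 1 ∧ semi = true
        · simp [hcond.2 hc, hc, hi, pvMain_eq, pvMainT]
        · have hc' : ¬ (i = n - 2 ∧ semi = true) := fun hh => hc (hcond.1 hh)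
          simp [hc', hc, hi, pvMain_eq, pvMainF, pvMainT]
          intro h1 h2
          exact absurd ⟨by simp [h1], h2⟩ hc
      rw [List.foldl_cons]
      simp only [hstep]
      rw [ih (i + 1) _ (by simp only [List.length_cons] at h ⊢; push_cast at h ⊢; omega)
        (by simp)]
      show _ = save ++ ((if (b :: bs).length = 1 ∧ semi = true then pvMainT t
        else pvMainF t) ++ '\n' :: pvOut semi (b :: bs))
      simp

theorem pvOut_noSemi (ys : List (List Char)) (a : List Char) :
    pvOut false (ys ++ [a]) = pvJoin '\n' (ys.map pvMainF ++ [pvMainT a]) := by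
  induction ys with
  | nil => simp [pvOut, pvJoin]
  | cons y ys ih =>
    rw [List.cons_append]
    cases hys : ys ++ [a] with
    | nil => exact absurd hys (by simp)
    | cons z zs =>
      show (if (z :: zs).length = 1 ∧ false = true then pvMainT y else pvMainF y)
          ++ '\n' :: pvOut false (z :: zs)
        = pvJoin '\n' ((y :: ys).map pvMainF ++ [pvMainT a])
      rw [if_neg (by simp), ← hys, ih]
      cases hm : ys.map pvMainF ++ [pvMainT a] with
      | nil => exact absurd hm (by simp)
      | cons w ws =>
        simp only [List.map_cons, List.cons_append, hm]
        show pvMainF y ++ '\n' :: pvJoin '\n' (w :: ws) = pvJoin '\n' (pvMainF y :: w :: ws)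
        rfl

theorem pvOut_semi (ys : List (List Char)) (a b : List Char) :
    pvOut true (ys ++ [a, b]) = pvJoin '\n' (ys.map pvMainF ++ [pvMainT a, pvMainT b]) := by
  induction ys with
  | nil =>
    show (if ([b] : List (List Char)).length = 1 ∧ true = true then pvMainT a else pvMainF a)
        ++ '\n' :: pvOut true [b] = pvJoin '\n' [pvMainT a, pvMainT b]
    simp [pvOut, pvJoin]
  | cons y ys ih =>
    rw [List.cons_append]
    cases hys : ys ++ [a, b] with
    | nil => exact absurd hys (by simp)
    | cons z zs =>
      show (if (z :: zs).length = 1 ∧ true = true then pvMainT y else pvMainF y)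
          ++ '\n' :: pvOut true (z :: zs)
        = pvJoin '\n' ((y :: ys).map pvMainF ++ [pvMainT a, pvMainT b])
      have hc : ¬ ((z :: zs).length = 1 ∧ true = true) := by
        rw [← hys]; simp
      rw [if_neg hc, ← hys, ih]
      cases hm : ys.map pvMainF ++ [pvMainT a, pvMainT b] with
      | nil => exact absurd hm (by simp)
      | cons w ws =>
        simp only [List.map_cons, List.cons_append, hm]
        show pvMainF y ++ '\n' :: pvJoin '\n' (w :: ws) = pvJoin '\n' (pvMainF y :: w :: ws)
        rfl

-- ---- glue: indexing / set ----

theorem pvGet_at {α : Type} (M : List α) (x : α) (r : List α) :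
    PySem.List.pyGet? (M ++ x :: r) (M.length : Int) = some x := by
  have h1 : (0:Int) ≤ (M.length : Int) := by positivity
  have h2 : (M.length : Int) < ((M ++ x :: r).length : Int) := by
    simp only [List.length_append, List.length_cons]
    push_cast
    omega
  simp only [PySem.List.pyGet?, PySem.List.pyIdx?, if_pos h1, if_pos h2, Int.toNat_natCast,
    Option.bind_some]
  rw [List.getElem?_append_right (le_refl _)]
  simp

theorem pvGet_last {α : Type} (xs : List α) (h : xs ≠ []) :
    PySem.List.pyGet? xs ((xs.length : Int) - 1) = xs.getLast? := by
  rcases xs.eq_nil_or_concat with rfl | ⟨M, x, rfl⟩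
  · exact absurd rfl h
  · rw [List.concat_eq_append]
    have he : ((M ++ [x]).length : Int) - 1 = (M.length : Int) := by simp
    rw [he, pvGet_at M x [], List.getLast?_concat]

theorem pvSet_at {α : Type} (M : List α) (x y : α) (r : List α) :
    (M ++ x :: r).set M.length y = M ++ y :: r := by
  induction M with
  | nil => simp
  | cons a as ih => simpa using ih

-- ---- characterizations of the two ports ----

def pvBFix (ls : List (List Char)) : List (List Char) :=
  let idx : Int := ls.length - 1
  let idx := if idx > 0 ∧ (PySem.List.pyGet? ls idx).getD [] = [] then idx - 1 else idx
  let line := (PySem.List.pyGet? ls idx).getD []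
  if PySem.Chars.endswith line [','] then
    ls.set idx.toNat (PySem.Chars.slice line none (some (-1)))
  else ls

theorem pvA_char (text : String) :
    add_comma_at_the_end_every_word text
      = String.ofList (pvOut
          (decide ((((pvSplit '\n' text.toList).getLast?.getD []).length = 0)))
          (pvSplit '\n' text.toList)) := by
  unfold add_comma_at_the_end_every_word
  simp only [pvSplitOn_eq, pvGet_last _ (pvSplit_ne_nil '\n' text.toList)]
  rw [pvFoldOut _ _ _ 0 [] (by simp) (pvSplit_ne_nil '\n' text.toList)]
  simp

theorem pvIf_add (cs : List Char) :
    (if pvFinal false cs = true then pvBody false cs ++ [','] else pvBody false cs)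
      = pvAdd cs := by
  unfold pvAdd
  split <;> simp_all

theorem pvAdd_split_join (cs : List Char) :
    pvAdd cs = pvJoin '\n' ((pvSplit '\n' cs).map pvAdd) := by
  rw [← pvAdd_join '\n' (by decide) _ (pvSplit_ne_nil _ _), pvJoin_split]

theorem pvB_char (text : String) :
    add_comma_at_the_end_every_word_alt text
      = String.ofList (pvJoin '\n' (pvBFix ((pvSplit '\n' text.toList).map pvAdd))) := by
  unfold add_comma_at_the_end_every_word_alt
  rw [pvFoldB]
  simp only [List.nil_append]
  rw [pvIf_add, pvAdd_split_join text.toList, pvSplitOn_eq,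
    pvSplit_join '\n' _ (by simp [pvSplit_ne_nil])
      (by
        intro l hl
        rcases List.mem_map.1 hl with ⟨t, ht, rfl⟩
        exact pvAdd_not_mem t (pvSplit_not_mem '\n' text.toList t ht)),
    PySem.Chars.join, pvJoin_eq_intercalate]
  rfl

-- ---- the common normal form ----

theorem pvMainGoal (lines : List (List Char)) (hnm : ∀ l ∈ lines, ('\n' : Char) ∉ l) :
    ∀ (hne : lines ≠ []),
    pvOut (decide ((lines.getLast?.getD []).length = 0)) lines
      = pvJoin '\n' (pvBFix (lines.map pvAdd)) := by
  rcases lines.eq_nil_or_concat with rfl | ⟨M, a, rfl⟩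
  · intro hne; exact absurd rfl hne
  rw [List.concat_eq_append] at hnm ⊢
  intro _
  have hM : ∀ l ∈ M, ('\n' : Char) ∉ l := fun l hl => hnm l (by simp [hl])
  have ha : ('\n' : Char) ∉ a := hnm a (by simp)
  have hmapF : M.map pvMainF = M.map pvAdd :=
    List.map_congr_left (fun l hl => pvMainF_eq_add l (hM l hl))
  by_cases haz : a = []
  · subst haz
    have hsemi : (decide (((M ++ [([] : List Char)]).getLast?.getD []).length = 0)) = true := by
      simp
    rw [hsemi]
    rcases M.eq_nil_or_concat with rfl | ⟨M', a', rfl⟩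
    · -- lines = [[]]
      show pvMainT [] = pvJoin '\n' (pvBFix (([[]] : List (List Char)).map pvAdd))
      decide
    · -- lines = M' ++ [a', []]
      rw [List.concat_eq_append] at hM ⊢
      have hM' : ∀ l ∈ M', ('\n' : Char) ∉ l := fun l hl => hM l (by simp [hl])
      have hmapF' : M'.map pvMainF = M'.map pvAdd :=
        List.map_congr_left (fun l hl => pvMainF_eq_add l (hM' l hl))
      have hA : pvOut true ((M' ++ [a']) ++ [([] : List Char)])
          = pvJoin '\n' (M'.map pvMainF ++ [pvMainT a', pvMainT []]) := by
        rw [List.append_assoc]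
        exact pvOut_semi M' a' []
      rw [hA]
      have hlines : ((M' ++ [a']) ++ [([] : List Char)]).map pvAdd
          = (M'.map pvAdd) ++ pvAdd a' :: [[]] := by
        simp [pvAdd_nil]
      rw [hlines]
      simp only [pvBFix]
      have hlen : (((M'.map pvAdd) ++ pvAdd a' :: [[]]).length : Int) - 1
          = (M'.length : Int) + 1 := by
        simp
        omega
      rw [hlen]
      have hget1 : PySem.List.pyGet? ((M'.map pvAdd) ++ pvAdd a' :: [[]])
          ((M'.length : Int) + 1) = some [] := by
        have h1 : (M'.length : Int) + 1 = (((M'.map pvAdd) ++ [pvAdd a']).length : Int) := by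
          simp
        rw [h1, show (M'.map pvAdd) ++ pvAdd a' :: [[]]
            = ((M'.map pvAdd) ++ [pvAdd a']) ++ ([] : List Char) :: [] by simp]
        exact pvGet_at _ _ _
      rw [hget1]
      rw [if_pos (⟨by positivity, rfl⟩ : ((M'.length : Int) + 1 > 0 ∧
        (some ([] : List Char)).getD [] = []))]
      have hidx : (M'.length : Int) + 1 - 1 = ((M'.map pvAdd).length : Int) := by simp
      rw [hidx, pvGet_at (M'.map pvAdd) (pvAdd a') [[]]]
      simp only [Option.getD_some, Int.toNat_natCast]
      by_cases he : PySem.Chars.endswith (pvAdd a') [','] = true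
      · rw [if_pos he, pvSet_at]
        have hs : PySem.Chars.slice (pvAdd a') none (some (-1)) = pvFix (pvAdd a') := by
          rw [pvFix, if_pos he]
        rw [hs, hmapF', pvMainT_eq_fix a' (hM a' (by simp))]
        rfl
      · rw [if_neg he]
        have hs : pvAdd a' = pvFix (pvAdd a') := by
          rw [pvFix, if_neg (by simpa using he)]
        rw [hmapF', pvMainT_eq_fix a' (hM a' (by simp)), ← hs]
        rfl
  · -- last line nonempty
    have hsemi : (decide (((M ++ [a]).getLast?.getD []).length = 0)) = false := by
      simp [List.getLast?_concat]
      exact haz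
    rw [hsemi, pvOut_noSemi M a]
    have hlines : (M ++ [a]).map pvAdd = (M.map pvAdd) ++ pvAdd a :: [] := by simp
    rw [hlines]
    simp only [pvBFix]
    have hlen : (((M.map pvAdd) ++ pvAdd a :: []).length : Int) - 1
        = ((M.map pvAdd).length : Int) := by simp
    rw [hlen, pvGet_at (M.map pvAdd) (pvAdd a) []]
    have hcond : ¬ (((M.map pvAdd).length : Int) > 0 ∧
        (some (pvAdd a)).getD [] = []) := by
      rintro ⟨-, h2⟩
      exact haz (pvAdd_eq_nil_iff a |>.1 (by simpa using h2))
    rw [if_neg hcond]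
    rw [pvGet_at (M.map pvAdd) (pvAdd a) []]
    simp only [Option.getD_some, Int.toNat_natCast]
    by_cases he : PySem.Chars.endswith (pvAdd a) [','] = true
    · rw [if_pos he, pvSet_at]
      have hs : PySem.Chars.slice (pvAdd a) none (some (-1)) = pvFix (pvAdd a) := by
        rw [pvFix, if_pos he]
      rw [hs, hmapF, pvMainT_eq_fix a ha]
    · rw [if_neg he]
      have hs : pvAdd a = pvFix (pvAdd a) := by
        rw [pvFix, if_neg (by simpa using he)]
      rw [hmapF, pvMainT_eq_fix a ha, ← hs]

-- ===== VERDICT (by name: the statement is the Claim_ definition above) =====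
theorem add_comma_at_the_end_every_word_spec : Claim_equal_add_comma_at_the_end_every_word := by
  intro text _
  show add_comma_at_the_end_every_word text = add_comma_at_the_end_every_word_alt text
  rw [pvA_char, pvB_char]
  congr 1
  exact pvMainGoal (pvSplit '\n' text.toList)
    (fun l hl => pvSplit_not_mem '\n' text.toList l hl)
    (pvSplit_ne_nil '\n' text.toList)
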